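-- pv_equiv track=rewrite | github.com/yamaton/CodeForces | problemSet/591C_Median_Smoothing.py | solve
-- ===== SOURCE A (Python) =====
-- def reduce_consec(iterable):
--     """
--     [1, 2, 3, 6, 7, 9, 10, 11, 12, 13, 20]
--     --> [(1, 3), (6, 2), (9, 5), (20, 1)]
--     Detect consecutive part and (starting_value, length) pair
--
--     :param xs: List of int
--     :return: List of pair of int
--     """
--     stack = []
--     for x in iterable:
--         if stack:
--             # check if consective
--             if stack[-1] + 1 == x:
--                 stack.append(x)
--             # if not consecutive, flush stack and start with new element
--             else:
--                 yield (stack[0], len(stack))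
--                 stack = [x]
--         else:
--             # starting element
--             stack.append(x)
--
--     if stack:
--         yield (stack[0], len(stack))
--
-- def alternating_indices(xs):
--     for i, x in enumerate(xs):
--         if i == 0 or i == len(xs) - 1:
--             continue
--         if xs[i-1] != x and xs[i+1] != x:
--             yield i
--
-- def solve(xs, n):
--     # zigzag = []  # alternating part
--     # for i, x in enumerate(xs):
--     #     if i == 0 or i == n - 1:
--     #         continue
--     #     if xs[i-1] != x and xs[i+1] != x:
--     #         zigzag.append(i)
--
--     zigzag = alternating_indices(xs)
--     zigzag_start_length_pairs = reduce_consec(zigzag)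
--     count = 0
--     result = xs[:]
--     for (i, n) in zigzag_start_length_pairs:
--         n_half = n // 2
--         count = max(count, (n + 1) // 2)
--         if n % 2 == 0:
--             for j in range(i, i + n_half):
--                 result[j] = xs[i-1]
--             for j in range(i + n_half, i + n):
--                 result[j] = 1 - xs[i-1]
--         else:
--             for j in range(i, i + n):
--                 result[j] = xs[i-1]
--     return count, result
-- ===== SOURCE B (Python) =====
-- def solve(xs, n):
--     m = len(xs)
--     # index i is "stable" iff median smoothing never changes it:
--     # an endpoint, or equal to one of its neighbours
--     stable = [i == 0 or i == m - 1 or xs[i] == xs[i - 1] or xs[i] == xs[i + 1]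
--               for i in range(m)]
--     # nearest stable index <= i (forward sweep) and >= i (backward sweep)
--     left = []
--     prev = 0
--     for i in range(m):
--         if stable[i]:
--             prev = i
--         left.append(prev)
--     right = []
--     nxt = m - 1
--     for i in range(m - 1, -1, -1):
--         if stable[i]:
--             nxt = i
--         right.append(nxt)
--     right.reverse()
--     # each unstable index settles from its nearest stable anchors
--     count = 0
--     result = []
--     for i in range(m):
--         if stable[i]:
--             result.append(xs[i])
--         else:
--             l, r = left[i], right[i]
--             count = max(count, min(i - l, r - i))
--             L = r - l - 1
--             result.append(xs[l] if L % 2 == 1 or i - l <= L // 2 else 1 - xs[l])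
--     return count, result
-- ===== Notes on version B (the rewrite author's own statement) =====
-- stated objective: alternative
-- what changed: A detects maximal alternating runs (generator + consecutive-grouping generator) and rewrites each run as an interval; B never forms runs: it marks per-index stability, computes every index's nearest stable anchor on each side by a forward and a backward sweep, and rebuilds each position independently from its two anchor distances (count = max over unstable i of min(i-left[i], right[i]-i)).
import Mathlib
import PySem

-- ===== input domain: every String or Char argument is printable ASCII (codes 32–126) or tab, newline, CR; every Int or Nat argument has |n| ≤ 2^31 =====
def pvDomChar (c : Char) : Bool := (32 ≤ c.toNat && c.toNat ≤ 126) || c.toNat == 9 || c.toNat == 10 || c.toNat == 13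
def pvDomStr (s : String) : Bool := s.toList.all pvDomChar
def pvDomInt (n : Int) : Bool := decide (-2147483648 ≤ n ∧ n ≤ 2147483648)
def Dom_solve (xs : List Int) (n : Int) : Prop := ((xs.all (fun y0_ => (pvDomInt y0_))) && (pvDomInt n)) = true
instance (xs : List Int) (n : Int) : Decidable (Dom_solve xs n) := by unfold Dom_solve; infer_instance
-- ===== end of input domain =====

-- B replaces A's run-based rewrite (alternating-index generator + consecutive-run grouping
-- + per-run interval fills) by a per-index reconstruction: two sweeps find each index's
-- nearest stable neighbour on either side, and each position is rebuilt independently from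
-- those two anchors (objective: alternative algorithm, same O(n) cost).

-- ===== PORT A =====
-- A's generator alternating_indices, materialised as a list (generators here read only xs,
-- never the mutated result, so eager evaluation is faithful).
def altIdx (xs : List Int) : List Int :=
  (PySem.List.enumerate xs 0).foldl
    (fun acc ix =>
      if ix.1 = 0 ∨ ix.1 = (xs.length : Int) - 1 then acc
      else if PySem.List.pyGetD xs (ix.1 - 1) 0 ≠ ix.2 ∧ PySem.List.pyGetD xs (ix.1 + 1) 0 ≠ ix.2
        then acc ++ [ix.1] else acc)
    []

-- one step of reduce_consec's loop; state = (yielded pairs so far, stack)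
def rcStep (st : List (Int × Int) × List Int) (x : Int) : List (Int × Int) × List Int :=
  if st.2 ≠ [] then
    if PySem.List.pyGetD st.2 (-1) 0 + 1 = x then (st.1, st.2 ++ [x])
    else (st.1 ++ [(PySem.List.pyGetD st.2 0 0, (st.2.length : Int))], [x])
  else (st.1, st.2 ++ [x])

-- the trailing 'if stack: yield (stack[0], len(stack))'
def rcFin (st : List (Int × Int) × List Int) : List (Int × Int) :=
  if st.2 ≠ [] then st.1 ++ [(PySem.List.pyGetD st.2 0 0, (st.2.length : Int))] else st.1

def reduceConsec (l : List Int) : List (Int × Int) :=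
  rcFin (l.foldl rcStep ([], []))

-- body of solve's 'for (i, n) in zigzag_start_length_pairs' loop (result[j] = … is a
-- set at an index that is provably in range, hence List.set with toNat is exact)
def aStep (xs : List Int) (st : Int × List Int) (p : Int × Int) : Int × List Int :=
  let i := p.1
  let k := p.2
  let nHalf := PySem.Int.floordiv k 2
  let count := max st.1 (PySem.Int.floordiv (k + 1) 2)
  if PySem.Int.mod k 2 = 0 then
    (count, (PySem.List.pyRange (i + nHalf) (i + k) 1).foldl
        (fun res j => res.set j.toNat (1 - PySem.List.pyGetD xs (i - 1) 0))
        ((PySem.List.pyRange i (i + nHalf) 1).foldl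
          (fun res j => res.set j.toNat (PySem.List.pyGetD xs (i - 1) 0)) st.2))
  else
    (count, (PySem.List.pyRange i (i + k) 1).foldl
        (fun res j => res.set j.toNat (PySem.List.pyGetD xs (i - 1) 0)) st.2)

def solve (xs : List Int) (n : Int) : Int × List Int :=
  (reduceConsec (altIdx xs)).foldl (aStep xs) (0, xs)

-- ===== PORT B =====
-- the stability test of B's list comprehension (short-circuit 'or' kept: the neighbour
-- lookups are only reached when the index disjuncts fail, so pyGetD indices are in range)
def stbI (xs : List Int) (i : Int) : Bool :=
  decide (i = 0 ∨ i = (xs.length : Int) - 1 ∨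
    PySem.List.pyGetD xs i 0 = PySem.List.pyGetD xs (i - 1) 0 ∨
    PySem.List.pyGetD xs i 0 = PySem.List.pyGetD xs (i + 1) 0)

def stableList (xs : List Int) : List Bool :=
  (PySem.List.pyRange 0 (xs.length : Int) 1).map (stbI xs)

-- forward sweep: 'prev' register + append
def leftList (m : Int) (stable : List Bool) : List Int :=
  ((PySem.List.pyRange 0 m 1).foldl (fun (st : Int × List Int) i =>
    let p := if PySem.List.pyGetD stable i false then i else st.1
    (p, st.2 ++ [p])) (0, [])).2

-- backward sweep: 'nxt' register + append, then reverse
def rightList (m : Int) (stable : List Bool) : List Int :=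
  (((PySem.List.pyRange (m - 1) (-1) (-1)).foldl (fun (st : Int × List Int) i =>
    let p := if PySem.List.pyGetD stable i false then i else st.1
    (p, st.2 ++ [p])) (m - 1, [])).2).reverse

-- body of B's final per-index loop
def bStep (xs : List Int) (stable : List Bool) (lf rt : List Int)
    (st : Int × List Int) (i : Int) : Int × List Int :=
  if PySem.List.pyGetD stable i false then (st.1, st.2 ++ [PySem.List.pyGetD xs i 0])
  else
    let l := PySem.List.pyGetD lf i 0
    let r := PySem.List.pyGetD rt i 0
    let cnt := max st.1 (min (i - l) (r - i))
    let L := r - l - 1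
    let v := if PySem.Int.mod L 2 = 1 ∨ i - l ≤ PySem.Int.floordiv L 2
             then PySem.List.pyGetD xs l 0 else 1 - PySem.List.pyGetD xs l 0
    (cnt, st.2 ++ [v])

def solve_alt (xs : List Int) (n : Int) : Int × List Int :=
  let stable := stableList xs
  let lf := leftList (xs.length : Int) stable
  let rt := rightList (xs.length : Int) stable
  (PySem.List.pyRange 0 (xs.length : Int) 1).foldl (bStep xs stable lf rt) (0, [])

-- ===== PRECONDITION & SPEC =====
def Spec_solve (xs : List Int) (n : Int) (out : Int × List Int) : Prop := out = solve_alt xs n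
instance (xs : List Int) (n : Int) (out : Int × List Int) : Decidable (Spec_solve xs n out) := by unfold Spec_solve; infer_instance

-- ===== CLAIM (what is proved, stated in full; the proofs are below) =====
def Claim_equal_solve : Prop := ∀ (xs : List Int) (n : Int), Dom_solve xs n → Spec_solve xs n (solve xs n)

-- ===== LEMMAS AND PROOFS =====

-- the alternating condition, as a Bool predicate on the index
def pcb (xs : List Int) (i : Int) : Bool :=
  decide (i < (xs.length : Int) - 1 ∧ PySem.List.pyGetD xs (i - 1) 0 ≠ PySem.List.pyGetD xs i 0 ∧
    PySem.List.pyGetD xs i 0 ≠ PySem.List.pyGetD xs (i + 1) 0)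

lemma altIdx_eq_filter (xs : List Int) :
    altIdx xs = (PySem.List.pyRange 1 (xs.length : Int) 1).filter (pcb xs) := by
  have h0 : altIdx xs = (PySem.List.pyRange 0 (xs.length : Int) 1).foldl
      (fun acc j => if (¬(j = 0 ∨ j = (xs.length : Int) - 1) ∧
          PySem.List.pyGetD xs (j - 1) 0 ≠ PySem.List.pyGetD xs j 0 ∧
          PySem.List.pyGetD xs (j + 1) 0 ≠ PySem.List.pyGetD xs j 0) then acc ++ [j] else acc) [] := by
    unfold altIdx
    rw [PySem.List.enumerate_eq_map_pyRange (xs := xs) (d := 0), List.foldl_map]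
    simp only [PySem.List.len_eq]
    congr 1
    funext acc j
    split_ifs <;> tauto
  rw [h0, PySem.List.foldl_append_ite_eq_filter, List.nil_append]
  rcases Nat.eq_zero_or_pos xs.length with hz | hpos
  · rw [PySem.List.pyRange_one_eq_nil (by simp [hz]), PySem.List.pyRange_one_eq_nil (by simp [hz])]
    simp
  · rw [PySem.List.pyRange_one_cons (by exact_mod_cast hpos : (0 : Int) < (xs.length : Int))]
    rw [show (0 : Int) + 1 = 1 from by omega]
    rw [List.filter_cons_of_neg (by simp)]
    apply List.filter_congr
    intro j hj
    have hj' := (PySem.List.mem_pyRange_one).1 hj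
    unfold pcb
    apply decide_eq_decide.2
    constructor
    · rintro ⟨h1, h2, h3⟩
      exact ⟨by omega, h2, Ne.symm h3⟩
    · rintro ⟨h1, h2, h3⟩
      exact ⟨by omega, h2, Ne.symm h3⟩

-- reduce_consec resumed from an arbitrary state
def rcRun (acc : List (Int × Int)) (stack : List Int) (l : List Int) : List (Int × Int) :=
  rcFin (l.foldl rcStep (acc, stack))

lemma rcStep_acc (acc : List (Int × Int)) (stack : List Int) (x : Int) :
    rcStep (acc, stack) x = (acc ++ (rcStep ([], stack) x).1, (rcStep ([], stack) x).2) := by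
  simp only [rcStep]; split_ifs <;> simp

lemma rcRun_cons (acc : List (Int × Int)) (stack : List Int) (x : Int) (t : List Int) :
    rcRun acc stack (x :: t) = rcRun (rcStep (acc, stack) x).1 (rcStep (acc, stack) x).2 t := rfl

lemma rcRun_acc (l : List Int) : ∀ (acc : List (Int × Int)) (stack : List Int),
    rcRun acc stack l = acc ++ rcRun [] stack l := by
  induction l with
  | nil =>
    intro acc stack
    simp only [rcRun, List.foldl_nil, rcFin]
    split_ifs <;> simp
  | cons x t ih =>
    intro acc stack
    rw [rcRun_cons, rcRun_cons, rcStep_acc, ih, ih (rcStep ([], stack) x).1, List.append_assoc]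

lemma rcRun_start (x : Int) (t : List Int) :
    rcRun [] [] (x :: t) = rcRun [] [x] t := by
  rw [rcRun_cons]; simp [rcStep]

lemma pyRange_last (s i : Int) (h : s < i) :
    PySem.List.pyGetD (PySem.List.pyRange s i 1) (-1) 0 = i - 1 := by
  have : PySem.List.pyRange s i 1 = PySem.List.pyRange s (i - 1) 1 ++ [i - 1] := by
    have := PySem.List.pyRange_one_succ_right (a := s) (b := i - 1) (by omega)
    simpa using this
  rw [this, PySem.List.pyGetD_neg_one_append_singleton]

lemma pyRange_ne_nil (s i : Int) (h : s < i) : PySem.List.pyRange s i 1 ≠ [] := by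
  rw [PySem.List.pyRange_one_cons h]; simp

lemma rcRun_extend (s i : Int) (h : s < i) (t : List Int) :
    rcRun [] (PySem.List.pyRange s i 1) (i :: t) = rcRun [] (PySem.List.pyRange s (i + 1) 1) t := by
  rw [rcRun_cons]
  have h1 : rcStep ([], PySem.List.pyRange s i 1) i
      = ([], PySem.List.pyRange s i 1 ++ [i]) := by
    simp only [rcStep]
    rw [if_pos (pyRange_ne_nil s i h), pyRange_last s i h, if_pos (by ring)]
  rw [h1]
  have h2 : PySem.List.pyRange s i 1 ++ [i] = PySem.List.pyRange s (i + 1) 1 :=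
    (PySem.List.pyRange_one_succ_right (a := s) (b := i) (by omega)).symm
  rw [h2]

lemma pyRange_head (s i : Int) (h : s < i) :
    PySem.List.pyGetD (PySem.List.pyRange s i 1) 0 0 = s := by
  rw [PySem.List.pyRange_one_cons h, PySem.List.pyGetD_zero_cons]

lemma pyRange_len (s i : Int) (h : s < i) :
    ((PySem.List.pyRange s i 1).length : Int) = i - s := by
  rw [PySem.List.length_pyRange_one]; omega

lemma rcRun_flush (s i : Int) (h : s < i) (t : List Int)
    (ht : t = [] ∨ ∃ x r', t = x :: r' ∧ x ≠ i) :
    rcRun [] (PySem.List.pyRange s i 1) t = (s, i - s) :: rcRun [] [] t := by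
  rcases ht with rfl | ⟨x, r', rfl, hx⟩
  · simp only [rcRun, List.foldl_nil, rcFin]
    rw [if_pos (pyRange_ne_nil s i h), if_neg (by simp)]
    rw [pyRange_head s i h, pyRange_len s i h]
    simp
  · rw [rcRun_cons, rcRun_start]
    have h1 : rcStep ([], PySem.List.pyRange s i 1) x
        = ([(s, i - s)], [x]) := by
      simp only [rcStep]
      rw [if_pos (pyRange_ne_nil s i h), pyRange_last s i h, if_neg (by omega)]
      rw [pyRange_head s i h, pyRange_len s i h]
      simp
    rw [h1, rcRun_acc]
    rfl

lemma fill_eq (v : Int) : ∀ (c : Nat) (a : Int) (r : List Int), 0 ≤ a → a.toNat + c ≤ r.length →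
    (PySem.List.pyRange a (a + (c : Int)) 1).foldl (fun res j => res.set j.toNat v) r
      = r.take a.toNat ++ List.replicate c v ++ r.drop (a.toNat + c) := by
  intro c
  induction c with
  | zero =>
    intro a r ha hlen
    rw [show a + ((0 : Nat) : Int) = a by omega, PySem.List.pyRange_one_eq_nil (le_refl a)]
    simp
  | succ c ih =>
    intro a r ha hlen
    have hlt : a < a + ((c + 1 : Nat) : Int) := by omega
    rw [PySem.List.pyRange_one_cons hlt, List.foldl_cons]
    have hset : r.set a.toNat v = r.take a.toNat ++ v :: r.drop (a.toNat + 1) :=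
      List.set_eq_take_cons_drop v (by omega)
    have hlen' : (a + 1).toNat + c ≤ (r.set a.toNat v).length := by
      rw [List.length_set]; omega
    have hrange : a + ((c + 1 : Nat) : Int) = (a + 1) + ((c : Nat) : Int) := by omega
    rw [hrange, ih (a + 1) (r.set a.toNat v) (by omega) hlen']
    have hta : (a + 1).toNat = a.toNat + 1 := by omega
    have htake : (r.take a.toNat).length = a.toNat := by
      rw [List.length_take]; omega
    rw [hta, hset]
    have h1 : (r.take a.toNat ++ v :: r.drop (a.toNat + 1)).take (a.toNat + 1)
        = r.take a.toNat ++ [v] := by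
      rw [show a.toNat + 1 = (r.take a.toNat).length + 1 from by rw [htake]]
      rw [List.take_append]; simp
    have h2 : (r.take a.toNat ++ v :: r.drop (a.toNat + 1)).drop (a.toNat + 1 + c)
        = r.drop (a.toNat + (c + 1)) := by
      rw [show a.toNat + 1 + c = (r.take a.toNat).length + (1 + c) from by rw [htake]; omega]
      rw [List.drop_append]
      rw [List.drop_eq_nil_of_le (Nat.le_add_right _ _), List.nil_append]
      rw [Nat.add_sub_cancel_left]
      rw [show 1 + c = c + 1 from by omega]
      rw [List.drop_succ_cons, List.drop_drop]
      congr 1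
      omega
    rw [h1, h2]
    simp [List.replicate_succ]


-- abbreviation for B's final loop body with its three precomputed tables (proof-side only)
def bS (xs : List Int) : Int × List Int → Int → Int × List Int :=
  bStep xs (stableList xs) (leftList (xs.length : Int) (stableList xs))
    (rightList (xs.length : Int) (stableList xs))

lemma solve_alt_eq (xs : List Int) (nn : Int) :
    solve_alt xs nn = (PySem.List.pyRange 0 (xs.length : Int) 1).foldl (bS xs) (0, []) := rfl

-- spec of the forward sweep: nlp xs j = value left[j]
def nlp (xs : List Int) : Nat → Int
  | 0 => 0
  | (j+1) => if stbI xs ((j : Int) + 1) then ((j : Int) + 1) else nlp xs j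

-- spec of the backward sweep, counted from the top: nrp xs e = value right[len-1-e]
def nrp (xs : List Int) : Nat → Int
  | 0 => (xs.length : Int) - 1
  | (e+1) => if stbI xs ((xs.length : Int) - 1 - ((e : Int) + 1))
             then (xs.length : Int) - 1 - ((e : Int) + 1) else nrp xs e

lemma stable_get (xs : List Int) (i : Int) (h0 : 0 ≤ i) (h : i < (xs.length : Int)) :
    PySem.List.pyGetD (stableList xs) i false = stbI xs i := by
  unfold stableList
  exact PySem.List.pyGetD_map_pyRange_of_nonneg (stbI xs) _ i false h0 h

lemma left_fold (xs : List Int) : ∀ (t : Nat), t ≤ xs.length →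
    (PySem.List.pyRange 0 (t : Int) 1).foldl (fun (st : Int × List Int) i =>
      let p := if PySem.List.pyGetD (stableList xs) i false then i else st.1
      (p, st.2 ++ [p])) (0, [])
    = (nlp xs (t - 1), (List.range t).map (nlp xs)) := by
  intro t
  induction t with
  | zero =>
    simp [PySem.List.pyRange_one_eq_nil (le_refl (0:Int)), nlp]
  | succ t ih =>
    intro ht
    have hsplit : PySem.List.pyRange 0 ((t+1 : Nat) : Int) 1
        = PySem.List.pyRange 0 (t : Int) 1 ++ [(t : Int)] := by
      rw [show ((t+1:Nat):Int) = (t:Int) + 1 from by push_cast; ring]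
      exact PySem.List.pyRange_one_succ_right (by positivity)
    rw [hsplit, List.foldl_append, ih (by omega)]
    simp only [List.foldl_cons, List.foldl_nil]
    rw [stable_get xs (t:Int) (by positivity) (by exact_mod_cast ht)]
    have hp : (if stbI xs (t:Int) then (t:Int) else nlp xs (t-1)) = nlp xs t := by
      cases t with
      | zero => simp [nlp, stbI]
      | succ j =>
        rw [show ((j+1:Nat):Int) = (j:Int) + 1 from by push_cast; ring]
        simp [nlp]
    rw [hp, List.range_succ, List.map_append]
    rfl

lemma leftList_eq (xs : List Int) :
    leftList (xs.length : Int) (stableList xs) = (List.range xs.length).map (nlp xs) := by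
  unfold leftList
  rw [left_fold xs xs.length (le_refl _)]

lemma right_fold (xs : List Int) : ∀ (t : Nat), t ≤ xs.length →
    (PySem.List.pyRange ((xs.length : Int) - 1) ((xs.length : Int) - 1 - (t : Int)) (-1)).foldl
      (fun (st : Int × List Int) i =>
        let p := if PySem.List.pyGetD (stableList xs) i false then i else st.1
        (p, st.2 ++ [p])) ((xs.length : Int) - 1, [])
    = (nrp xs (t - 1), (List.range t).map (nrp xs)) := by
  intro t
  induction t with
  | zero =>
    simp [nrp]
  | succ t ih =>
    intro ht
    have hlen1 : 1 ≤ xs.length := by omega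
    have hsplit : PySem.List.pyRange ((xs.length:Int) - 1) ((xs.length:Int) - 1 - ((t+1:Nat):Int)) (-1)
        = PySem.List.pyRange ((xs.length:Int) - 1) ((xs.length:Int) - 1 - (t:Int)) (-1)
          ++ [(xs.length:Int) - 1 - (t:Int)] := by
      rw [show (xs.length:Int) - 1 - ((t+1:Nat):Int) = ((xs.length:Int) - 1 - (t:Int)) - 1 from by push_cast; ring]
      rw [PySem.List.pyRange_neg_one_eq_reverse, PySem.List.pyRange_neg_one_eq_reverse]
      rw [show (xs.length:Int) - 1 - (t:Int) - 1 + 1 = (xs.length:Int) - 1 - (t:Int) from by ring]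
      rw [show (xs.length:Int) - 1 + 1 = (xs.length:Int) from by ring]
      rw [PySem.List.pyRange_one_cons (by omega : (xs.length:Int) - 1 - (t:Int) < (xs.length:Int))]
      rw [show (xs.length:Int) - 1 - (t:Int) + 1 = (xs.length:Int) - (t:Int) from by ring]
      rw [List.reverse_cons]
    rw [hsplit, List.foldl_append, ih (by omega)]
    simp only [List.foldl_cons, List.foldl_nil]
    rw [stable_get xs ((xs.length:Int) - 1 - (t:Int)) (by omega) (by omega)]
    have hp : (if stbI xs ((xs.length:Int) - 1 - (t:Int)) then (xs.length:Int) - 1 - (t:Int)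
        else nrp xs (t-1)) = nrp xs t := by
      cases t with
      | zero =>
        have hs : stbI xs ((xs.length:Int) - 1 - ((0:Nat):Int)) = true := by
          simp [stbI]
        rw [hs]
        simp [nrp]
      | succ j =>
        rw [show ((j+1:Nat):Int) = (j:Int) + 1 from by push_cast; ring]
        simp [nrp]
    rw [hp, List.range_succ, List.map_append]
    rfl

lemma rightList_eq (xs : List Int) :
    rightList (xs.length : Int) (stableList xs) = ((List.range xs.length).map (nrp xs)).reverse := by
  have h := right_fold xs xs.length (le_refl _)
  rw [show (xs.length:Int) - 1 - ((xs.length:Nat):Int) = -1 from by ring] at h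
  unfold rightList
  rw [h]

lemma left_get (xs : List Int) (i : Int) (h0 : 0 ≤ i) (h : i < (xs.length : Int)) :
    PySem.List.pyGetD (leftList (xs.length : Int) (stableList xs)) i 0 = nlp xs i.toNat := by
  rw [leftList_eq, PySem.List.pyGetD_eq_getElem _ _ h0 (by simpa using h)]
  simp

lemma right_get (xs : List Int) (i : Int) (h0 : 0 ≤ i) (h : i < (xs.length : Int)) :
    PySem.List.pyGetD (rightList (xs.length : Int) (stableList xs)) i 0
      = nrp xs (xs.length - 1 - i.toNat) := by
  rw [rightList_eq, PySem.List.pyGetD_eq_getElem _ _ h0 (by simpa using h)]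
  simp [List.getElem_reverse]

lemma stb_not_pcb (xs : List Int) (i : Int) (h1 : 1 ≤ i) (h2 : i < (xs.length : Int)) :
    stbI xs i = !pcb xs i := by
  unfold stbI pcb
  rw [← decide_not]
  apply decide_eq_decide.2
  constructor
  · rintro (h | h | h | h) ⟨q1, q2, q3⟩
    · omega
    · omega
    · exact q2 h.symm
    · exact q3 h
  · intro hq
    by_cases hA : i < (xs.length:Int) - 1
    · by_cases hB : PySem.List.pyGetD xs (i-1) 0 = PySem.List.pyGetD xs i 0
      · exact Or.inr (Or.inr (Or.inl hB.symm))
      · have hC : ¬ PySem.List.pyGetD xs i 0 ≠ PySem.List.pyGetD xs (i+1) 0 := by tauto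
        exact Or.inr (Or.inr (Or.inr (not_not.mp hC)))
    · exact Or.inr (Or.inl (by omega))

-- length of the maximal alternating run starting at i (fuel k = distance to the end)
def runLen (xs : List Int) : Int → Nat → Nat
  | _, 0 => 0
  | i, (k+1) => if pcb xs i then runLen xs (i+1) k + 1 else 0

lemma runLen_le (xs : List Int) : ∀ (k : Nat) (i : Int), runLen xs i k ≤ k := by
  intro k
  induction k with
  | zero => intro i; simp [runLen]
  | succ k ih =>
    intro i
    have := ih (i+1)
    simp only [runLen]
    split_ifs <;> omega

lemma runLen_mem (xs : List Int) : ∀ (k : Nat) (i : Int) (d : Nat),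
    d < runLen xs i k → pcb xs (i + (d : Int)) = true := by
  intro k
  induction k with
  | zero => intro i d hd; simp [runLen] at hd
  | succ k ih =>
    intro i d hd
    simp only [runLen] at hd
    split_ifs at hd with h
    · cases d with
      | zero => simpa using h
      | succ d =>
        have := ih (i+1) d (by omega)
        rw [show i + ((d+1:Nat):Int) = (i+1) + (d:Int) from by push_cast; ring]
        exact this
    · omega

lemma runLen_stop (xs : List Int) : ∀ (k : Nat) (i : Int),
    i + (k : Int) = (xs.length : Int) → pcb xs (i + (runLen xs i k : Int)) = false := by
  intro k
  induction k with
  | zero =>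
    intro i hi
    simp only [runLen, Nat.cast_zero, add_zero]
    simp only [pcb, decide_eq_false_iff_not]
    rintro ⟨h, -, -⟩
    omega
  | succ k ih =>
    intro i hi
    simp only [runLen]
    split_ifs with h
    · rw [show i + ((runLen xs (i+1) k + 1 : Nat):Int) = (i+1) + ((runLen xs (i+1) k : Nat):Int) from by push_cast; ring]
      exact ih (i+1) (by push_cast at hi ⊢; omega)
    · simpa using h

lemma nlp_stable (xs : List Int) (j : Nat) (h : stbI xs (j : Int) = true) : nlp xs j = (j : Int) := by
  cases j with
  | zero => simp [nlp]
  | succ j =>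
    rw [show ((j+1:Nat):Int) = (j:Int) + 1 from by push_cast; ring] at h
    simp [nlp, h]

lemma nlp_run (xs : List Int) (i : Int) (h1 : 1 ≤ i) (hanchor : stbI xs (i - 1) = true) :
    ∀ (d : Nat), (i + (d : Int) < (xs.length : Int)) →
      (∀ e : Nat, e ≤ d → stbI xs (i + (e : Int)) = false) →
      nlp xs (i + (d : Int)).toNat = i - 1 := by
  intro d
  induction d with
  | zero =>
    intro hlt he
    rw [show (i + ((0:Nat):Int)).toNat = (i.toNat - 1) + 1 from by omega]
    simp only [nlp]
    rw [show ((i.toNat - 1 : Nat):Int) + 1 = i from by omega]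
    have h0 := he 0 (le_refl _)
    rw [show i + ((0:Nat):Int) = i from by push_cast; ring] at h0
    rw [h0]
    simp only [Bool.false_eq_true, if_false]
    have := nlp_stable xs (i.toNat - 1) (by rw [show ((i.toNat - 1 : Nat):Int) = i - 1 from by omega]; exact hanchor)
    rw [this]
    omega
  | succ d ih =>
    intro hlt he
    rw [show (i + ((d+1:Nat):Int)).toNat = (i + (d:Int)).toNat + 1 from by omega]
    simp only [nlp]
    rw [show (((i + (d:Int)).toNat : Nat):Int) + 1 = i + ((d+1:Nat):Int) from by omega]
    rw [he (d+1) (le_refl _)]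
    simp only [Bool.false_eq_true, if_false]
    exact ih (by omega) (fun e hee => he e (by omega))

lemma nrp_at_stable (xs : List Int) (j : Nat) (hj : j < xs.length) (h : stbI xs (j : Int) = true) :
    nrp xs (xs.length - 1 - j) = (j : Int) := by
  by_cases hj1 : j = xs.length - 1
  · rw [show xs.length - 1 - j = 0 from by omega]
    simp only [nrp]
    omega
  · rw [show xs.length - 1 - j = (xs.length - 2 - j) + 1 from by omega]
    simp only [nrp]
    rw [show (xs.length:Int) - 1 - (((xs.length - 2 - j : Nat):Int) + 1) = (j:Int) from by omega]
    rw [h]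
    simp

lemma nrp_at_unstable (xs : List Int) (j : Nat) (hj : (j : Int) < (xs.length : Int) - 1)
    (h : stbI xs (j : Int) = false) :
    nrp xs (xs.length - 1 - j) = nrp xs (xs.length - 1 - (j + 1)) := by
  rw [show xs.length - 1 - j = (xs.length - 1 - (j+1)) + 1 from by omega]
  simp only [nrp]
  rw [show (xs.length:Int) - 1 - (((xs.length - 1 - (j+1) : Nat):Int) + 1) = (j:Int) from by omega]
  rw [h]
  simp

lemma aStep_eval (xs : List Int) (c : Int) (r : List Int) (s : Int) (L : Nat)
    (h1 : 0 ≤ s) (hL : 1 ≤ L) (h3 : s.toNat + L ≤ r.length) :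
    aStep xs (c, r) (s, (L : Int)) = (max c (PySem.Int.floordiv ((L : Int) + 1) 2),
      r.take s.toNat ++ List.replicate (if L % 2 = 0 then L/2 else L) (PySem.List.pyGetD xs (s-1) 0)
        ++ List.replicate (L - (if L % 2 = 0 then L/2 else L)) (1 - PySem.List.pyGetD xs (s-1) 0)
        ++ r.drop (s.toNat + L)) := by
  have hw2 : PySem.Int.mod ((L:Int)) 2 = ((L % 2 : Nat) : Int) := by
    rw [show (2:Int) = ((2:Nat):Int) from rfl]
    exact PySem.Int.mod_natCast L 2
  have hfd : PySem.Int.floordiv ((L:Int)) 2 = ((L / 2 : Nat) : Int) := by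
    rw [show (2:Int) = ((2:Nat):Int) from rfl]
    exact PySem.Int.floordiv_natCast L 2
  simp only [aStep]
  by_cases hpar : L % 2 = 0
  · have hc : PySem.Int.mod ((L:Int)) 2 = 0 := by rw [hw2, hpar]; norm_num
    rw [if_pos hc]
    have hNeq : (if L % 2 = 0 then L/2 else L) = L/2 := if_pos hpar
    rw [hNeq, hfd]
    rw [fill_eq (PySem.List.pyGetD xs (s-1) 0) (L/2) s r h1 (by omega)]
    set w := PySem.List.pyGetD xs (s-1) 0 with hw
    set X1 := r.take s.toNat ++ List.replicate (L/2) w ++ r.drop (s.toNat + L/2) with hX1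
    have hX1len : X1.length = r.length := by
      rw [hX1]
      simp only [List.length_append, List.length_take, List.length_replicate, List.length_drop]
      omega
    rw [show s + (L:Int) = s + ((L/2 : Nat):Int) + ((L - L/2 : Nat):Int) from by push_cast; omega]
    rw [fill_eq (1 - w) (L - L/2) (s + ((L/2 : Nat):Int)) X1 (by omega) (by rw [hX1len]; omega)]
    have hq : (s + ((L/2 : Nat):Int)).toNat = s.toNat + L/2 := by omega
    have hfront : (r.take s.toNat ++ List.replicate (L/2) w).length = s.toNat + L/2 := by
      simp only [List.length_append, List.length_take, List.length_replicate]
      omega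
    have htake : X1.take (s + ((L/2 : Nat):Int)).toNat
        = r.take s.toNat ++ List.replicate (L/2) w := by
      rw [hq, hX1, List.take_append, List.take_of_length_le (le_of_eq hfront), hfront,
        Nat.sub_self, List.take_zero, List.append_nil]
    have hdrop : X1.drop ((s + ((L/2 : Nat):Int)).toNat + (L - L/2)) = r.drop (s.toNat + L) := by
      rw [hq, hX1, List.drop_append, List.drop_eq_nil_of_le (by rw [hfront]; omega),
        List.nil_append, hfront, List.drop_drop]
      congr 1
      omega
    rw [htake, hdrop]
  · have hc : ¬ PySem.Int.mod ((L:Int)) 2 = 0 := by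
      rw [hw2]
      intro hh
      exact hpar (by exact_mod_cast hh)
    rw [if_neg hc]
    have hNeq : (if L % 2 = 0 then L/2 else L) = L := if_neg hpar
    rw [hNeq]
    rw [fill_eq (PySem.List.pyGetD xs (s-1) 0) L s r h1 h3]
    simp [List.append_assoc]

lemma map_range_ite (a b : Nat) (x y : Int) :
    (List.range (a + b)).map (fun d => if d < a then x else y)
      = List.replicate a x ++ List.replicate b y := by
  rw [List.range_add, List.map_append, List.map_map]
  congr 1
  · have h1 : (List.range a).map (fun d => if d < a then x else y)
        = (List.range a).map (fun _ => x) :=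
      List.map_congr_left (by intro d hd; simp [List.mem_range.mp hd])
    rw [h1, List.map_const', List.length_range]
  · have h2 : (List.range b).map ((fun d => if d < a then x else y) ∘ (a + ·))
        = (List.range b).map (fun _ => y) :=
      List.map_congr_left (by intro d hd; simp)
    rw [h2, List.map_const', List.length_range]

-- the values B writes across a run, as replicate blocks
lemma vals_eq (xs : List Int) (i : Int) (L : Nat) (hL : 1 ≤ L) :
    (List.range L).map (fun (d : Nat) =>
        if PySem.Int.mod ((L : Int)) 2 = 1 ∨ (d : Int) + 1 ≤ PySem.Int.floordiv ((L : Int)) 2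
        then PySem.List.pyGetD xs (i - 1) 0 else 1 - PySem.List.pyGetD xs (i - 1) 0)
      = List.replicate (if L % 2 = 0 then L/2 else L) (PySem.List.pyGetD xs (i-1) 0)
        ++ List.replicate (L - (if L % 2 = 0 then L/2 else L)) (1 - PySem.List.pyGetD xs (i-1) 0) := by
  have hw2 : PySem.Int.mod ((L:Int)) 2 = ((L % 2 : Nat) : Int) := by
    rw [show (2:Int) = ((2:Nat):Int) from rfl]
    exact PySem.Int.mod_natCast L 2
  have hfd : PySem.Int.floordiv ((L:Int)) 2 = ((L / 2 : Nat) : Int) := by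
    rw [show (2:Int) = ((2:Nat):Int) from rfl]
    exact PySem.Int.floordiv_natCast L 2
  by_cases hpar : L % 2 = 0
  · have hNeq : (if L % 2 = 0 then L/2 else L) = L/2 := if_pos hpar
    rw [hNeq]
    have hcong : ∀ d ∈ List.range L,
        (if PySem.Int.mod ((L:Int)) 2 = 1 ∨ (d : Int) + 1 ≤ PySem.Int.floordiv ((L:Int)) 2
         then PySem.List.pyGetD xs (i - 1) 0 else 1 - PySem.List.pyGetD xs (i - 1) 0)
        = (if d < L/2 then PySem.List.pyGetD xs (i - 1) 0 else 1 - PySem.List.pyGetD xs (i - 1) 0) := by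
      intro d hd
      refine if_congr ?_ rfl rfl
      rw [hw2, hfd, hpar]
      constructor
      · rintro (h | h)
        · norm_num at h
        · omega
      · intro h
        right
        omega
    rw [List.map_congr_left hcong]
    have := map_range_ite (L/2) (L - L/2) (PySem.List.pyGetD xs (i - 1) 0)
      (1 - PySem.List.pyGetD xs (i - 1) 0)
    rw [show L/2 + (L - L/2) = L from by omega] at this
    rw [this]
  · have hNeq : (if L % 2 = 0 then L/2 else L) = L := if_neg hpar
    rw [hNeq]
    have hcong : ∀ d ∈ List.range L,
        (if PySem.Int.mod ((L:Int)) 2 = 1 ∨ (d : Int) + 1 ≤ PySem.Int.floordiv ((L:Int)) 2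
         then PySem.List.pyGetD xs (i - 1) 0 else 1 - PySem.List.pyGetD xs (i - 1) 0)
        = PySem.List.pyGetD xs (i - 1) 0 := by
      intro d hd
      rw [if_pos (Or.inl (by rw [hw2]; exact_mod_cast (by omega : L % 2 = 1)))]
    rw [List.map_congr_left hcong, List.map_const', List.length_range]
    simp

lemma runB (xs : List Int) (i : Int) (L : Nat) (c : Int) (acc : List Int)
    (h1 : 1 ≤ i) (hL : 1 ≤ L) (hLm : i + (L : Int) ≤ (xs.length : Int) - 1)
    (hrun : ∀ d : Nat, d < L → pcb xs (i + (d : Int)) = true)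
    (hstop : pcb xs (i + (L : Int)) = false)
    (hanchor : stbI xs (i - 1) = true) (h0c : 0 ≤ c) :
    (PySem.List.pyRange i (i + (L : Int)) 1).foldl (bS xs) (c, acc)
      = (max c (PySem.Int.floordiv ((L : Int) + 1) 2),
         acc ++ (List.range L).map (fun (d : Nat) =>
           if PySem.Int.mod ((L : Int)) 2 = 1 ∨ (d : Int) + 1 ≤ PySem.Int.floordiv ((L : Int)) 2
           then PySem.List.pyGetD xs (i - 1) 0 else 1 - PySem.List.pyGetD xs (i - 1) 0)) := by
  have hMed : PySem.Int.floordiv ((L:Int) + 1) 2 = ((L:Int) + 1) / 2 :=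
    PySem.Int.floordiv_eq_ediv_of_pos (by norm_num)
  have hstb : ∀ d : Nat, d < L → stbI xs (i + (d:Int)) = false := by
    intro d hd
    rw [stb_not_pcb xs _ (by omega) (by omega), hrun d hd]
    rfl
  have hstbL : stbI xs (i + (L:Int)) = true := by
    rw [stb_not_pcb xs _ (by omega) (by omega), hstop]
    rfl
  have hleft : ∀ d : Nat, d < L → nlp xs (i + (d:Int)).toNat = i - 1 :=
    fun d hd => nlp_run xs i h1 hanchor d (by omega) (fun e he => hstb e (by omega))
  have hright : ∀ (u d : Nat), d + u = L →
      nrp xs (xs.length - 1 - (i + (d:Int)).toNat) = i + (L:Int) := by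
    intro u
    induction u with
    | zero =>
      intro d hd
      have hdL : d = L := by omega
      rw [hdL]
      have hcast : (((i + (L:Int)).toNat : Nat):Int) = i + (L:Int) := by omega
      rw [nrp_at_stable xs (i + (L:Int)).toNat (by omega) (by rw [hcast]; exact hstbL), hcast]
    | succ u ihu =>
      intro d hd
      have hdL : d < L := by omega
      have hj : (((i + (d:Int)).toNat : Nat) : Int) < (xs.length:Int) - 1 := by omega
      have hs : stbI xs (((i + (d:Int)).toNat : Nat) : Int) = false := by
        rw [show (((i + (d:Int)).toNat : Nat):Int) = i + (d:Int) from by omega]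
        exact hstb d hdL
      rw [nrp_at_unstable xs (i + (d:Int)).toNat hj hs]
      rw [show (i + (d:Int)).toNat + 1 = (i + ((d+1:Nat):Int)).toNat from by omega]
      exact ihu (d+1) (by omega)
  have key : ∀ (u t : Nat), t + u = L →
      (PySem.List.pyRange (i + (t:Int)) (i + (L:Int)) 1).foldl (bS xs)
        (max c (min (t:Int) (PySem.Int.floordiv ((L:Int) + 1) 2)),
          acc ++ (List.range t).map (fun (d : Nat) =>
            if PySem.Int.mod ((L:Int)) 2 = 1 ∨ (d : Int) + 1 ≤ PySem.Int.floordiv ((L:Int)) 2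
            then PySem.List.pyGetD xs (i - 1) 0 else 1 - PySem.List.pyGetD xs (i - 1) 0))
      = (max c (min ((L:Int)) (PySem.Int.floordiv ((L:Int) + 1) 2)),
          acc ++ (List.range L).map (fun (d : Nat) =>
            if PySem.Int.mod ((L:Int)) 2 = 1 ∨ (d : Int) + 1 ≤ PySem.Int.floordiv ((L:Int)) 2
            then PySem.List.pyGetD xs (i - 1) 0 else 1 - PySem.List.pyGetD xs (i - 1) 0)) := by
    intro u
    induction u with
    | zero =>
      intro t ht
      obtain rfl : t = L := by omega
      rw [PySem.List.pyRange_one_eq_nil (le_refl _)]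
      rfl
    | succ u ihu =>
      intro t ht
      have htL : t < L := by omega
      rw [PySem.List.pyRange_one_cons (by omega : i + (t:Int) < i + (L:Int)), List.foldl_cons]
      have hstep : bS xs
          (max c (min (t:Int) (PySem.Int.floordiv ((L:Int) + 1) 2)),
            acc ++ (List.range t).map (fun (d : Nat) =>
              if PySem.Int.mod ((L:Int)) 2 = 1 ∨ (d : Int) + 1 ≤ PySem.Int.floordiv ((L:Int)) 2
              then PySem.List.pyGetD xs (i - 1) 0 else 1 - PySem.List.pyGetD xs (i - 1) 0))
          (i + (t:Int))
          = (max c (min ((t:Int) + 1) (PySem.Int.floordiv ((L:Int) + 1) 2)),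
            acc ++ (List.range (t+1)).map (fun (d : Nat) =>
              if PySem.Int.mod ((L:Int)) 2 = 1 ∨ (d : Int) + 1 ≤ PySem.Int.floordiv ((L:Int)) 2
              then PySem.List.pyGetD xs (i - 1) 0 else 1 - PySem.List.pyGetD xs (i - 1) 0)) := by
        simp only [bS, bStep]
        rw [stable_get xs _ (by omega) (by omega), hstb t htL]
        simp only [Bool.false_eq_true, if_false]
        rw [left_get xs _ (by omega) (by omega), right_get xs _ (by omega) (by omega)]
        rw [hleft t htL, hright (L - t) t (by omega)]
        rw [Prod.mk.injEq]
        constructor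
        · rw [show i + (t:Int) - (i - 1) = (t:Int) + 1 from by ring,
            show i + (L:Int) - (i + (t:Int)) = (L:Int) - (t:Int) from by ring]
          rw [hMed]
          omega
        · rw [show i + (L:Int) - (i - 1) - 1 = ((L:Int)) from by ring,
            show i + (t:Int) - (i - 1) = (t:Int) + 1 from by ring]
          rw [List.range_succ, List.map_append, List.map_cons, List.map_nil, ← List.append_assoc]
      rw [hstep]
      have := ihu (t+1) (by omega)
      rw [show ((t+1:Nat):Int) = (t:Int) + 1 from by push_cast; ring] at this
      rw [show i + ((t:Int) + 1) = i + (t:Int) + 1 from by ring] at this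
      exact this
  have h0 := key L 0 (by omega)
  rw [show i + ((0:Nat):Int) = i from by norm_num] at h0
  simp only [Nat.cast_zero, List.range_zero, List.map_nil, List.append_nil] at h0
  rw [show min (0:Int) (PySem.Int.floordiv ((L:Int) + 1) 2) = 0 from by rw [hMed]; omega,
    max_eq_left h0c,
    show min ((L:Int)) (PySem.Int.floordiv ((L:Int) + 1) 2) = PySem.Int.floordiv ((L:Int) + 1) 2
      from by rw [hMed]; omega] at h0
  exact h0

lemma mainL (xs : List Int) : ∀ (k : Nat) (i c : Int) (r acc : List Int),
    (xs.length : Int) = i + (k : Int) → 1 ≤ i → r.length = xs.length →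
    r.drop i.toNat = xs.drop i.toNat → acc = r.take i.toNat →
    (i = 1 ∨ pcb xs (i - 1) = false ∨ pcb xs i = false) → 0 ≤ c →
    (rcRun [] [] ((PySem.List.pyRange i (xs.length : Int) 1).filter (pcb xs))).foldl
        (aStep xs) (c, r)
      = (PySem.List.pyRange i (xs.length : Int) 1).foldl (bS xs) (c, acc) := by
  intro k
  induction k using Nat.strong_induction_on with
  | _ k ihk =>
    intro i c r acc hm h1 hrlen hrdrop hacc hprev h0c
    rcases Nat.eq_zero_or_pos k with hk0 | hkpos
    · subst hk0
      rw [PySem.List.pyRange_one_eq_nil (by omega)]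
      simp only [List.filter_nil, List.foldl_nil]
      have h0 : rcRun [] [] ([] : List Int) = [] := rfl
      rw [h0, List.foldl_nil, hacc, List.take_of_length_le (by omega)]
    · have hiltm : i < (xs.length:Int) := by omega
      rcases Nat.eq_zero_or_pos (runLen xs i k) with hL0 | hLpos
      · have hpcbi : pcb xs i = false := by
          cases hpc : pcb xs i
          · rfl
          · exfalso
            rcases k with _ | k'
            · omega
            · simp only [runLen, hpc, if_true] at hL0
              omega
        have hstbi : stbI xs i = true := by
          rw [stb_not_pcb xs i h1 hiltm, hpcbi]
          rfl
        rw [PySem.List.pyRange_one_cons hiltm]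
        rw [List.filter_cons_of_neg (by simp [hpcbi]), List.foldl_cons]
        have hstep : bS xs (c, acc) i = (c, acc ++ [PySem.List.pyGetD xs i 0]) := by
          simp only [bS, bStep]
          rw [stable_get xs i (by omega) hiltm, hstbi]
          simp
        rw [hstep]
        have hri : r[i.toNat]'(by omega) = xs[i.toNat]'(by omega) := by
          have h01 : (r.drop i.toNat)[0]'(by simp; omega) = (xs.drop i.toNat)[0]'(by simp; omega) := by
            simp only [hrdrop]
          rw [List.getElem_drop, List.getElem_drop] at h01
          simpa using h01
        have hx : PySem.List.pyGetD xs i 0 = xs[i.toNat]'(by omega) :=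
          PySem.List.pyGetD_eq_getElem xs (0:Int) (by omega) (by omega)
        have hacc' : acc ++ [PySem.List.pyGetD xs i 0] = r.take ((i+1)).toNat := by
          rw [show (i+1).toNat = i.toNat + 1 from by omega, List.take_succ]
          rw [hacc]
          congr 1
          rw [hx, ← hri]
          rw [List.getElem?_eq_getElem (show i.toNat < r.length by omega)]
          simp
        rw [hacc']
        have hdd1 : ∀ (l : List Int), l.drop (i.toNat + 1) = (l.drop i.toNat).drop 1 := by
          intro l
          rw [← List.drop_drop]
        have hdrop' : r.drop (i+1).toNat = xs.drop (i+1).toNat := by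
          rw [show (i+1).toNat = i.toNat + 1 from by omega, hdd1, hdd1, hrdrop]
        have hres := ihk (k-1) (by omega) (i+1) c r (r.take (i+1).toNat)
          (by push_cast at hm ⊢; omega) (by omega) hrlen hdrop' rfl
          (Or.inr (Or.inl (by rw [show i + 1 - 1 = i from by ring]; exact hpcbi))) h0c
        exact hres
      · set L := runLen xs i k with hLdef
        have hLk : L ≤ k := runLen_le xs k i
        have hrun : ∀ d : Nat, d < L → pcb xs (i + (d:Int)) = true :=
          fun d hd => runLen_mem xs k i d hd
        have hstop : pcb xs (i + (L:Int)) = false := runLen_stop xs k i (by omega)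
        have hLm : i + (L:Int) ≤ (xs.length:Int) - 1 := by
          have hc := hrun (L-1) (by omega)
          simp only [pcb, decide_eq_true_eq] at hc
          omega
        have hanchor : stbI xs (i-1) = true := by
          by_cases hi1 : i = 1
          · subst hi1
            norm_num [stbI]
          · rcases hprev with h | h | h
            · exact absurd h hi1
            · rw [stb_not_pcb xs (i-1) (by omega) (by omega), h]
              rfl
            · exfalso
              have hco := hrun 0 (by omega)
              rw [show i + ((0:Nat):Int) = i from by norm_num, h] at hco
              exact Bool.false_ne_true hco
        have hsplitR : PySem.List.pyRange i (xs.length:Int) 1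
            = PySem.List.pyRange i (i + (L:Int)) 1
              ++ PySem.List.pyRange (i + (L:Int)) (xs.length:Int) 1 :=
          PySem.List.pyRange_one_append i (i + (L:Int)) (xs.length:Int) (by omega) (by omega)
        have hfilter1 : (PySem.List.pyRange i (i + (L:Int)) 1).filter (pcb xs)
            = PySem.List.pyRange i (i + (L:Int)) 1 := by
          rw [List.filter_eq_self]
          intro a ha
          have hmem := (PySem.List.mem_pyRange_one).1 ha
          have hd := hrun (a - i).toNat (by omega)
          rw [show i + (((a - i).toNat : Nat):Int) = a from by omega] at hd
          exact hd
        set rest := (PySem.List.pyRange (i + (L:Int)) (xs.length:Int) 1).filter (pcb xs) with hrest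
        have hrc : rcRun [] [] ((PySem.List.pyRange i (xs.length:Int) 1).filter (pcb xs))
            = (i, (L:Int)) :: rcRun [] [] rest := by
          rw [hsplitR, List.filter_append, hfilter1, ← hrest]
          have hgrow : ∀ (u d : Nat), d + u = L → 1 ≤ d →
              rcRun [] (PySem.List.pyRange i (i + (d:Int)) 1)
                (PySem.List.pyRange (i + (d:Int)) (i + (L:Int)) 1 ++ rest)
              = rcRun [] (PySem.List.pyRange i (i + (L:Int)) 1) rest := by
            intro u
            induction u with
            | zero =>
              intro d hdL hd1
              obtain rfl : d = L := by omega
              rw [PySem.List.pyRange_one_eq_nil (le_refl _), List.nil_append]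
            | succ u ihu =>
              intro d hdL hd1
              rw [PySem.List.pyRange_one_cons (by omega : i + (d:Int) < i + (L:Int)), List.cons_append]
              rw [rcRun_extend i (i + (d:Int)) (by omega) _]
              rw [show i + (d:Int) + 1 = i + ((d+1:Nat):Int) from by push_cast; ring]
              exact ihu (d+1) (by omega) (by omega)
          rw [PySem.List.pyRange_one_cons (by omega : i < i + (L:Int)), List.cons_append, rcRun_start]
          rw [show i + 1 = i + ((1:Nat):Int) from by norm_num]
          have hone : [i] = PySem.List.pyRange i (i + ((1:Nat):Int)) 1 := by
            rw [show i + ((1:Nat):Int) = i + 1 from by norm_num]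
            exact (PySem.List.pyRange_one_singleton i).symm
          rw [hone, hgrow (L-1) 1 (by omega) (le_refl 1)]
          have hcond : rest = [] ∨ ∃ x r', rest = x :: r' ∧ x ≠ i + (L:Int) := by
            cases hr : rest with
            | nil => exact Or.inl rfl
            | cons x t =>
              refine Or.inr ⟨x, t, rfl, ?_⟩
              have hx : x ∈ rest := by rw [hr]; exact List.mem_cons_self
              rw [hrest] at hx
              have hx2 := List.of_mem_filter hx
              intro hEq
              rw [hEq, hstop] at hx2
              exact Bool.false_ne_true hx2
          rw [rcRun_flush i (i + (L:Int)) (by omega) rest hcond]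
          rw [show i + (L:Int) - i = (L:Int) from by ring]
        rw [hrc, List.foldl_cons]
        rw [aStep_eval xs c r i L (by omega) hLpos (by omega)]
        rw [hsplitR, List.foldl_append]
        rw [runB xs i L c acc h1 hLpos hLm hrun hstop hanchor h0c]
        rw [vals_eq xs i L hLpos]
        set w := PySem.List.pyGetD xs (i-1) 0 with hw
        set hN := (if L % 2 = 0 then L/2 else L) with hNdef
        set M := PySem.Int.floordiv ((L:Int) + 1) 2 with hMdef
        have hNle : hN ≤ L := by rw [hNdef]; split_ifs <;> omega
        have hFlen : (r.take i.toNat ++ List.replicate hN w ++ List.replicate (L - hN) (1 - w)).length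
            = i.toNat + L := by
          simp only [List.length_append, List.length_take, List.length_replicate]
          omega
        set r' := r.take i.toNat ++ List.replicate hN w ++ List.replicate (L - hN) (1 - w)
          ++ r.drop (i.toNat + L) with hr'
        have hr'len : r'.length = xs.length := by
          rw [hr']
          simp only [List.length_append, List.length_take, List.length_replicate, List.length_drop]
          omega
        have hdd2 : ∀ (l : List Int), l.drop (i.toNat + L) = (l.drop i.toNat).drop L := by
          intro l
          rw [← List.drop_drop]
        have hr'drop : r'.drop (i + (L:Int)).toNat = xs.drop (i + (L:Int)).toNat := by
          rw [show (i + (L:Int)).toNat = i.toNat + L from by omega]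
          rw [hr', List.drop_append, List.drop_eq_nil_of_le (le_of_eq hFlen), List.nil_append,
            hFlen, Nat.sub_self, List.drop_zero]
          rw [hdd2 r, hrdrop, ← hdd2 xs]
        have hr'take : acc ++ (List.replicate hN w ++ List.replicate (L - hN) (1 - w))
            = r'.take (i + (L:Int)).toNat := by
          rw [show (i + (L:Int)).toNat = i.toNat + L from by omega]
          rw [hr', List.take_append, List.take_of_length_le (le_of_eq hFlen), hFlen,
            Nat.sub_self, List.take_zero, List.append_nil, hacc, List.append_assoc]
        have hres := ihk (k - L) (by omega) (i + (L:Int)) (max c M) r'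
          (acc ++ (List.replicate hN w ++ List.replicate (L - hN) (1 - w)))
          (by push_cast at hm ⊢; omega) (by omega) hr'len hr'drop hr'take
          (Or.inr (Or.inr hstop))
          (le_trans h0c (le_max_left c M))
        exact hres

-- ===== VERDICT (by name: the statement is the Claim_ definition above) =====
theorem solve_spec : Claim_equal_solve := by
  intro xs nn hdom
  show solve xs nn = solve_alt xs nn
  rcases Nat.eq_zero_or_pos xs.length with hz | hpos
  · have hxs : xs = [] := List.length_eq_zero_iff.mp hz
    subst hxs
    rfl
  · rw [solve_alt_eq]
    show (reduceConsec (altIdx xs)).foldl (aStep xs) (0, xs) = _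
    rw [altIdx_eq_filter]
    have hrr : ∀ l, reduceConsec l = rcRun [] [] l := fun l => rfl
    rw [hrr]
    rw [PySem.List.pyRange_one_cons (by exact_mod_cast hpos : (0:Int) < (xs.length:Int)),
      List.foldl_cons]
    have hstb0 : stbI xs 0 = true := by norm_num [stbI]
    have hstep : bS xs (0, []) 0 = (0, [PySem.List.pyGetD xs 0 0]) := by
      simp only [bS, bStep]
      rw [stable_get xs 0 (le_refl _) (by exact_mod_cast hpos), hstb0]
      simp
    rw [hstep]
    have htake1 : [PySem.List.pyGetD xs 0 0] = xs.take (1:Int).toNat := by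
      rw [show (1:Int).toNat = 1 from rfl]
      cases xs with
      | nil => simp at hpos
      | cons a t => simp [PySem.List.pyGetD_zero_cons]
    have hres := mainL xs (xs.length - 1) 1 0 xs [PySem.List.pyGetD xs 0 0]
      (by push_cast; omega) (le_refl _) rfl rfl htake1 (Or.inl rfl) (le_refl 0)
    rw [show (0:Int) + 1 = 1 from by norm_num]
    exact hres
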